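-- pv_equiv track=rewrite | github.com/zeldu18/Pink-Tax-Comparison | src/pink_tax/utils.py | select_diverse_pair_codes
-- ===== SOURCE A (Python) =====
-- from collections import Counter
--
-- def select_diverse_pair_codes(products: list[dict], limit: int) -> set[str]:
--     """
--     Select pair codes with balanced brand/category coverage for limited runs.
--     """
--
--     if limit <= 0:
--         return set()
--
--     pair_meta: list[tuple[str, str, str, int]] = []
--     seen_codes: set[str] = set()
--     for index, product in enumerate(products):
--         pair_code = str(product.get("pair_code", "")).strip()
--         if not pair_code or pair_code in seen_codes:
--             continue
--         seen_codes.add(pair_code)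
--         brand = str(product.get("brand", "")).strip()
--         category = str(product.get("category", "")).strip()
--         pair_meta.append((pair_code, brand, category, index))
--
--     if limit >= len(pair_meta):
--         return {code for code, _, _, _ in pair_meta}
--
--     selected: list[str] = []
--     selected_set: set[str] = set()
--     brand_counts: Counter[str] = Counter()
--     category_counts: Counter[str] = Counter()
--
--     while len(selected) < limit:
--         candidates = [meta for meta in pair_meta if meta[0] not in selected_set]
--         if not candidates:
--             break
--
--         pair_code, brand, category, _ = min(
--             candidates,
--             key=lambda item: (
--                 brand_counts[item[1]],
--                 category_counts[item[2]],
--                 item[3],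
--             ),
--         )
--         selected.append(pair_code)
--         selected_set.add(pair_code)
--         brand_counts[brand] += 1
--         category_counts[category] += 1
--
--     return set(selected)
-- ===== SOURCE B (Python) =====
-- def select_diverse_pair_codes(products: list[dict], limit: int) -> set[str]:
--     """
--     Select pair codes with balanced brand/category coverage for limited runs.
--     """
--     if limit <= 0:
--         return set()
--
--     # Dedupe by pair code with a single dict (code -> (brand, category, index)).
--     seen: dict[str, tuple[str, str, int]] = {}
--     for index, product in enumerate(products):
--         code = str(product.get("pair_code", "")).strip()
--         if code and code not in seen:
--             seen[code] = (
--                 str(product.get("brand", "")).strip(),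
--                 str(product.get("category", "")).strip(),
--                 index,
--             )
--
--     if limit >= len(seen):
--         return set(seen)
--
--     # Lazy priority pool: candidates kept sorted ascending by their last-computed
--     # key (brand_count, category_count, index).  Counts only grow, so a stored key
--     # can only be <= the current key; when the head's stored key is still current
--     # it is the exact minimum (keys are unique: the index component differs), so
--     # it is selected; otherwise it is refreshed and reinserted at its sorted spot.
--     pool = [((0, 0, i), code, b, c) for code, (b, c, i) in seen.items()]
--     pool.sort(key=lambda e: e[0])
--     brand_counts: dict[str, int] = {}
--     category_counts: dict[str, int] = {}
--     result: list[str] = []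
--     for _ in range(limit):
--         while True:
--             key, code, b, c = pool.pop(0)
--             cur = (brand_counts.get(b, 0), category_counts.get(c, 0), key[2])
--             if cur == key:
--                 break
--             pos = 0
--             while pos < len(pool) and pool[pos][0] < cur:
--                 pos += 1
--             pool.insert(pos, (cur, code, b, c))
--         result.append(code)
--         brand_counts[b] = brand_counts.get(b, 0) + 1
--         category_counts[c] = category_counts.get(c, 0) + 1
--     return set(result)
-- ===== Notes on version B (the rewrite author's own statement) =====
-- stated objective: alternative
-- what changed: Dedup uses one dict instead of a list plus seen-set, and the greedy rounds no longer re-filter and min-scan the whole candidate list: B keeps a lazy priority pool sorted by last-computed (brand_count,category_count,index) keys, popping the head and selecting it when its stored key is still current (keys only grow and are unique by index, so a fresh head is the exact minimum), otherwise refreshing the key and reinserting at its sorted position.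
import Mathlib
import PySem

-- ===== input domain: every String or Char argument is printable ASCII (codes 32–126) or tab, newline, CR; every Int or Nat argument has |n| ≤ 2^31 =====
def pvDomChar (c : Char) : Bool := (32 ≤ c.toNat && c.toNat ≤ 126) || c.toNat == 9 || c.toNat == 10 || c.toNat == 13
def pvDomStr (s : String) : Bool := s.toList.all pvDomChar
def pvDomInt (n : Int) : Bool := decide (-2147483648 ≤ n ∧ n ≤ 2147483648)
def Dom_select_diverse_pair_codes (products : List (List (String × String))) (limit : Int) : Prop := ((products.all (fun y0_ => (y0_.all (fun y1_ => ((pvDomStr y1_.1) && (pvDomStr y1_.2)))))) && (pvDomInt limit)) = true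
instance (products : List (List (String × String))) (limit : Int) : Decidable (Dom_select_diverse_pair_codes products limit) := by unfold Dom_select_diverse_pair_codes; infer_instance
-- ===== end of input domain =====

-- B replaces A's per-round re-filter + min-scan by a lazy priority pool: one initial sort by the
-- (brand_count, category_count, index) key, then pop-head with lazy key refresh (objective: alternative).

-- Python tuple '<' on the (brand_count, category_count, index) key: lexicographic on Int triples (exact).
def pvTupLt3 (x y : Int × Int × Int) : Bool :=
  decide (x.1 < y.1 ∨ (x.1 = y.1 ∧ (x.2.1 < y.2.1 ∨ (x.2.1 = y.2.1 ∧ x.2.2 < y.2.2))))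

-- the selection key both Pythons compute: (brand_counts[brand], category_counts[category], index)
def pvKeyOf (bc cc : PySem.Dict String Int) (m : String × String × String × Int) : Int × Int × Int :=
  (bc.getD m.2.1 0, cc.getD m.2.2.1 0, m.2.2.2)

-- ===== PORT A =====
-- body of A's first for-loop: dedupe into (pair_meta, seen_codes)
def pvDedupA (st : List (String × String × String × Int) × PySem.Set String)
    (ip : Int × List (String × String)) : List (String × String × String × Int) × PySem.Set String :=
  let pair_code := PySem.Str.strip ((PySem.Dict.mk ip.2).getD "pair_code" "")
  if pair_code == "" || PySem.Set.contains st.2 pair_code then st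
  else
    let brand := PySem.Str.strip ((PySem.Dict.mk ip.2).getD "brand" "")
    let category := PySem.Str.strip ((PySem.Dict.mk ip.2).getD "category" "")
    (st.1 ++ [(pair_code, brand, category, ip.1)], PySem.Set.add st.2 pair_code)

-- min(candidates, key=...): Python keeps the FIRST element with minimal key (strict-< replacement)
def pvMinStep (bc cc : PySem.Dict String Int)
    (b m : String × String × String × Int) : String × String × String × Int :=
  if pvTupLt3 (pvKeyOf bc cc m) (pvKeyOf bc cc b) then m else b

-- A's while-loop; fuel = limit - len(selected): each iteration appends exactly one code, so the
-- loop guard 'len(selected) < limit' is exactly 'fuel > 0'.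
def pvLoopA (pair_meta : List (String × String × String × Int)) :
    Nat → List String → PySem.Set String → PySem.Dict String Int → PySem.Dict String Int → List String
  | 0, selected, _, _, _ => selected
  | fuel + 1, selected, sset, bc, cc =>
    match pair_meta.filter (fun m => !(PySem.Set.contains sset m.1)) with
    | [] => selected
    | c :: rest =>
      let best := rest.foldl (pvMinStep bc cc) c
      pvLoopA pair_meta fuel (selected ++ [best.1]) (PySem.Set.add sset best.1)
        (bc.insert best.2.1 (bc.getD best.2.1 0 + 1))
        (cc.insert best.2.2.1 (cc.getD best.2.2.1 0 + 1))

def select_diverse_pair_codes (products : List (List (String × String))) (limit : Int) : List String :=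
  if limit ≤ 0 then [] else
  let st := (PySem.List.enumerate products).foldl pvDedupA ([], PySem.Set.empty)
  if (st.1.length : Int) ≤ limit then PySem.Set.ofList (st.1.map (·.1))
  else PySem.Set.ofList (pvLoopA st.1 limit.toNat [] PySem.Set.empty PySem.Dict.empty PySem.Dict.empty)

-- ===== PORT B =====
-- body of B's dedup loop: one dict code -> (brand, category, index)
def pvDedupB (seen : PySem.Dict String (String × String × Int))
    (ip : Int × List (String × String)) : PySem.Dict String (String × String × Int) :=
  let code := PySem.Str.strip ((PySem.Dict.mk ip.2).getD "pair_code" "")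
  if !(code == "") && !(seen.contains code) then
    seen.insert code
      (PySem.Str.strip ((PySem.Dict.mk ip.2).getD "brand" ""),
       PySem.Str.strip ((PySem.Dict.mk ip.2).getD "category" ""), ip.1)
  else seen

-- B's 'pool.insert(pos, entry)' after the linear scan: insert before the first element whose
-- stored key is not < the refreshed key (exactly Python's scan-and-insert).
-- A pool entry is (stored key, code, brand, category), as in Source B.
def pvIns (e : (Int × Int × Int) × String × String × String) :
    List ((Int × Int × Int) × String × String × String) →
    List ((Int × Int × Int) × String × String × String)
  | [] => [e]
  | x :: xs => if pvTupLt3 x.1 e.1 then x :: pvIns e xs else e :: x :: xs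

-- B's inner 'while True': pop the head; select it if its stored key is still current, else
-- refresh the key and reinsert at the sorted position.  Fuel bounds the (always terminating)
-- loop; pvLoopB passes pool.length + 1, which the proofs show is never exhausted.
def pvPopFresh (bc cc : PySem.Dict String Int) :
    Nat → List ((Int × Int × Int) × String × String × String) →
    Option ((String × String × String) × List ((Int × Int × Int) × String × String × String))
  | 0, _ => none
  | _ + 1, [] => none
  | f + 1, e :: rest =>
    let cur : Int × Int × Int := (bc.getD e.2.2.1 0, cc.getD e.2.2.2 0, e.1.2.2)
    if cur = e.1 then some (e.2, rest)
    else pvPopFresh bc cc f (pvIns (cur, e.2) rest)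

-- B's 'for _ in range(limit)' over the lazy pool
def pvLoopB :
    Nat → List ((Int × Int × Int) × String × String × String) →
    PySem.Dict String Int → PySem.Dict String Int → List String → List String
  | 0, _, _, _, result => result
  | n + 1, pool, bc, cc, result =>
    match pvPopFresh bc cc (pool.length + 1) pool with
    | none => result  -- unreachable in Source B (the inner while always pops a fresh head; proved below)
    | some (m, rest) =>
      pvLoopB n rest (bc.insert m.2.1 (bc.getD m.2.1 0 + 1))
        (cc.insert m.2.2 (cc.getD m.2.2 0 + 1)) (result ++ [m.1])

def select_diverse_pair_codes_alt (products : List (List (String × String))) (limit : Int) : List String :=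
  if limit ≤ 0 then [] else
  let seen := (PySem.List.enumerate products).foldl pvDedupB PySem.Dict.empty
  if (seen.items.length : Int) ≤ limit then PySem.Set.ofList seen.keys
  else
    let pool0 := seen.items.map (fun kv => ((((0:Int), (0:Int), kv.2.2.2) : Int × Int × Int), kv.1, kv.2.1, kv.2.2.1))
    -- pool.sort(key=lambda e: e[0]): PySem's stable sort in its insertBy formulation
    -- (PySem.List.sorted_eq_foldl_insertBy), with Python's tuple '<' as the comparator
    let pool := pool0.foldl (fun acc x => PySem.List.insertBy (fun a b => pvTupLt3 a.1 b.1) x acc) []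
    PySem.Set.ofList (pvLoopB limit.toNat pool PySem.Dict.empty PySem.Dict.empty [])

-- ===== PRECONDITION & SPEC =====
def Spec_select_diverse_pair_codes (products : List (List (String × String))) (limit : Int) (out : List String) : Prop := out = select_diverse_pair_codes_alt products limit
instance (products : List (List (String × String))) (limit : Int) (out : List String) : Decidable (Spec_select_diverse_pair_codes products limit out) := by unfold Spec_select_diverse_pair_codes; infer_instance

-- ===== CLAIM (what is proved, stated in full; the proofs are below) =====
def Claim_equal_select_diverse_pair_codes : Prop := ∀ (products : List (List (String × String))) (limit : Int), Dom_select_diverse_pair_codes products limit → Spec_select_diverse_pair_codes products limit (select_diverse_pair_codes products limit)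

-- ===== LEMMAS AND PROOFS =====

-- a pool entry is (stored key, code, brand, category); the A-side meta it stands for:
def pvEntMeta (e : (Int × Int × Int) × String × String × String) :
    String × String × String × Int := (e.2.1, e.2.2.1, e.2.2.2, e.1.2.2)

-- the CURRENT key of a pool entry (= pvKeyOf of its meta, definitionally)
def pvCurKey (bc cc : PySem.Dict String Int)
    (e : (Int × Int × Int) × String × String × String) : Int × Int × Int :=
  (bc.getD e.2.2.1 0, cc.getD e.2.2.2 0, e.1.2.2)

-- ----- lexicographic-order facts about pvTupLt3 -----
theorem pvLt_irrefl (a : Int × Int × Int) : pvTupLt3 a a = false := by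
  obtain ⟨a1, a2, a3⟩ := a
  simp only [pvTupLt3, decide_eq_false_iff_not]; omega

theorem pvLt_trans {a b c : Int × Int × Int} (h1 : pvTupLt3 a b = true)
    (h2 : pvTupLt3 b c = true) : pvTupLt3 a c = true := by
  obtain ⟨a1, a2, a3⟩ := a; obtain ⟨b1, b2, b3⟩ := b; obtain ⟨c1, c2, c3⟩ := c
  simp only [pvTupLt3, decide_eq_true_eq] at h1 h2 ⊢; omega

theorem pvLt_asymm {a b : Int × Int × Int} (h : pvTupLt3 a b = true) :
    pvTupLt3 b a = false := by
  obtain ⟨a1, a2, a3⟩ := a; obtain ⟨b1, b2, b3⟩ := b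
  simp only [pvTupLt3, decide_eq_true_eq] at h
  simp only [pvTupLt3, decide_eq_false_iff_not]; omega

theorem pvLt_of_lt_of_not_lt {a b c : Int × Int × Int} (h1 : pvTupLt3 a b = true)
    (h2 : pvTupLt3 c b = false) : pvTupLt3 a c = true := by
  obtain ⟨a1, a2, a3⟩ := a; obtain ⟨b1, b2, b3⟩ := b; obtain ⟨c1, c2, c3⟩ := c
  simp only [pvTupLt3, decide_eq_true_eq] at h1 ⊢
  simp only [pvTupLt3, decide_eq_false_iff_not] at h2; omega

theorem pvLt_of_not_lt_of_lt {a b c : Int × Int × Int} (h1 : pvTupLt3 a b = false)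
    (h2 : pvTupLt3 a c = true) : pvTupLt3 b c = true := by
  obtain ⟨a1, a2, a3⟩ := a; obtain ⟨b1, b2, b3⟩ := b; obtain ⟨c1, c2, c3⟩ := c
  simp only [pvTupLt3, decide_eq_true_eq] at h2 ⊢
  simp only [pvTupLt3, decide_eq_false_iff_not] at h1; omega

theorem pvLt_connex_of_ne_idx {a b : Int × Int × Int} (h : a.2.2 ≠ b.2.2) :
    pvTupLt3 a b = true ∨ pvTupLt3 b a = true := by
  obtain ⟨a1, a2, a3⟩ := a; obtain ⟨b1, b2, b3⟩ := b
  simp only [pvTupLt3, decide_eq_true_eq]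
  simp only at h; omega

theorem pvLe_lex {a b : Int × Int × Int} (h1 : a.1 ≤ b.1) (h2 : a.2.1 ≤ b.2.1)
    (h3 : a.2.2 = b.2.2) : pvTupLt3 b a = false := by
  obtain ⟨a1, a2, a3⟩ := a; obtain ⟨b1, b2, b3⟩ := b
  simp only at h1 h2 h3
  simp only [pvTupLt3, decide_eq_false_iff_not]; omega

theorem pvLt_00 {i j : Int} (h : i < j) :
    pvTupLt3 ((0 : Int), (0 : Int), i) ((0 : Int), (0 : Int), j) = true := by
  unfold pvTupLt3
  exact decide_eq_true (Or.inr ⟨rfl, Or.inr ⟨rfl, h⟩⟩)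

-- ----- A's running minimum: membership, minimality, uniqueness -----
theorem pv_foldl_min_mem (bc cc : PySem.Dict String Int)
    (L : List (String × String × String × Int)) (c : String × String × String × Int) :
    L.foldl (pvMinStep bc cc) c ∈ c :: L := by
  induction L generalizing c with
  | nil => simp
  | cons m L ih =>
    rw [List.foldl_cons]
    have h := ih (pvMinStep bc cc c m)
    have hcm : pvMinStep bc cc c m = m ∨ pvMinStep bc cc c m = c := by
      unfold pvMinStep; split <;> simp
    rcases List.mem_cons.mp h with h1 | h1
    · rcases hcm with h2 | h2 <;> rw [h1, h2]
      · exact List.mem_cons_of_mem _ (List.mem_cons_self ..)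
      · exact List.mem_cons_self ..
    · exact List.mem_cons_of_mem _ (List.mem_cons_of_mem _ h1)

theorem pv_foldl_min_le (bc cc : PySem.Dict String Int)
    (L : List (String × String × String × Int)) (c : String × String × String × Int) :
    ∀ x ∈ c :: L, pvTupLt3 (pvKeyOf bc cc x) (pvKeyOf bc cc (L.foldl (pvMinStep bc cc) c)) = false := by
  induction L generalizing c with
  | nil =>
    intro x hx
    rcases List.mem_cons.mp hx with h | h
    · subst h; simp [pvLt_irrefl]
    · simp at h
  | cons m L ih =>
    intro x hx
    rw [List.foldl_cons]
    by_cases hlt : pvTupLt3 (pvKeyOf bc cc m) (pvKeyOf bc cc c) = true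
    · have hd : pvMinStep bc cc c m = m := by simp [pvMinStep, hlt]
      rw [hd]
      rcases List.mem_cons.mp hx with h | h
      · subst h
        cases hcf : pvTupLt3 (pvKeyOf bc cc x) (pvKeyOf bc cc (L.foldl (pvMinStep bc cc) m)) with
        | false => rfl
        | true =>
          have hm := ih m m (List.mem_cons_self ..)
          rw [pvLt_trans hlt hcf] at hm; cases hm
      · exact ih m x h
    · have hd : pvMinStep bc cc c m = c := by simp [pvMinStep, hlt]
      rw [hd]
      rw [Bool.not_eq_true] at hlt
      rcases List.mem_cons.mp hx with h | h
      · exact ih c x (by rw [h]; exact List.mem_cons_self ..)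
      · rcases List.mem_cons.mp h with h' | h'
        · subst h'
          cases hmf : pvTupLt3 (pvKeyOf bc cc x) (pvKeyOf bc cc (L.foldl (pvMinStep bc cc) c)) with
          | false => rfl
          | true =>
            have hcf := ih c c (List.mem_cons_self ..)
            rw [pvLt_of_not_lt_of_lt hlt hmf] at hcf; cases hcf
        · exact ih c x (List.mem_cons_of_mem _ h')

theorem pv_foldl_min_unique (bc cc : PySem.Dict String Int)
    (L : List (String × String × String × Int)) (c e : String × String × String × Int)
    (he : e ∈ c :: L)
    (hstrict : ∀ m ∈ c :: L, m ≠ e → pvTupLt3 (pvKeyOf bc cc e) (pvKeyOf bc cc m) = true) :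
    L.foldl (pvMinStep bc cc) c = e := by
  by_cases hre : L.foldl (pvMinStep bc cc) c = e
  · exact hre
  · have h1 := hstrict _ (pv_foldl_min_mem bc cc L c) hre
    have h2 := pv_foldl_min_le bc cc L c e he
    rw [h1] at h2; cases h2

-- ----- the dedup phases agree: B's dict is A's pair_meta re-paired -----
theorem pv_dedup_inv (l : List (Int × List (String × String)))
    (ms : List (String × String × String × Int)) (hn : (ms.map (·.1)).Nodup) :
    (l.foldl pvDedupB (PySem.Dict.mk (ms.map (fun m => (m.1, m.2)))) =
      PySem.Dict.mk (((l.foldl pvDedupA (ms, ms.map (·.1))).1).map (fun m => (m.1, m.2)))) ∧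
    ((l.foldl pvDedupA (ms, ms.map (·.1))).2 = (l.foldl pvDedupA (ms, ms.map (·.1))).1.map (·.1)) ∧
    (((l.foldl pvDedupA (ms, ms.map (·.1))).1.map (·.1)).Nodup) := by
  induction l generalizing ms with
  | nil => exact ⟨rfl, rfl, hn⟩
  | cons ip l ih =>
    simp only [List.foldl_cons]
    set code := PySem.Str.strip ((PySem.Dict.mk ip.2).getD "pair_code" "") with hcodedef
    have hc : (PySem.Dict.mk (ms.map (fun m => (m.1, m.2)))).contains code =
        PySem.Set.contains (ms.map (·.1)) code := by
      rw [Bool.eq_iff_iff]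
      simp [PySem.Dict.contains, PySem.Set.contains]
    by_cases h0 : (code == "") = true
    · have ha : pvDedupA (ms, ms.map (·.1)) ip = (ms, ms.map (·.1)) := by
        simp only [pvDedupA]; rw [← hcodedef, h0]; simp
      have hb : pvDedupB (PySem.Dict.mk (ms.map (fun m => (m.1, m.2)))) ip =
          PySem.Dict.mk (ms.map (fun m => (m.1, m.2))) := by
        simp only [pvDedupB]; rw [← hcodedef, h0]; simp
      rw [ha, hb]; exact ih ms hn
    · rw [Bool.not_eq_true] at h0
      by_cases h1 : PySem.Set.contains (ms.map (·.1)) code = true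
      · have ha : pvDedupA (ms, ms.map (·.1)) ip = (ms, ms.map (·.1)) := by
          simp only [pvDedupA]; rw [← hcodedef, h1]; simp
        have hb : pvDedupB (PySem.Dict.mk (ms.map (fun m => (m.1, m.2)))) ip =
            PySem.Dict.mk (ms.map (fun m => (m.1, m.2))) := by
          simp only [pvDedupB]; rw [← hcodedef, hc, h1]; simp
        rw [ha, hb]; exact ih ms hn
      · rw [Bool.not_eq_true] at h1
        have hnotmem : code ∉ ms.map (·.1) := by
          simpa [PySem.Set.contains] using h1
        set brand := PySem.Str.strip ((PySem.Dict.mk ip.2).getD "brand" "") with hbd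
        set category := PySem.Str.strip ((PySem.Dict.mk ip.2).getD "category" "") with hcd
        set ms' := ms ++ [(code, brand, category, ip.1)] with hms'
        have ha : pvDedupA (ms, ms.map (·.1)) ip = (ms', ms'.map (·.1)) := by
          simp only [pvDedupA]
          rw [← hcodedef, ← hbd, ← hcd, h0, h1]
          simp only [Bool.or_self, Bool.false_eq_true, if_false, Prod.mk.injEq]
          refine ⟨hms'.symm, ?_⟩
          simp only [PySem.Set.add, PySem.Set.contains] at h1 ⊢
          simp only [h1, Bool.false_eq_true, if_false]
          simp [hms']
        have hb : pvDedupB (PySem.Dict.mk (ms.map (fun m => (m.1, m.2)))) ip =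
            PySem.Dict.mk (ms'.map (fun m => (m.1, m.2))) := by
          simp only [pvDedupB]
          rw [← hcodedef, ← hbd, ← hcd, hc, h0, h1]
          simp only [Bool.not_false, Bool.and_self, if_true]
          simp only [PySem.Dict.insert]
          rw [hc, h1]
          simp [hms']
        rw [ha, hb]
        apply ih ms'
        rw [hms', List.map_append]
        rw [List.nodup_append]
        refine ⟨hn, List.nodup_singleton _, ?_⟩
        intro a ha' b hb' hab
        rw [List.map_cons, List.map_nil, List.mem_singleton] at hb'
        rw [hab, hb'] at ha'
        exact hnotmem ha'

-- A's pair_meta carries strictly increasing indices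
theorem pv_dedupA_idx : ∀ (l : List (Int × List (String × String)))
    (st : List (String × String × String × Int) × PySem.Set String),
    l.Pairwise (fun a b => a.1 < b.1) →
    (∀ m ∈ st.1, ∀ ip ∈ l, m.2.2.2 < ip.1) →
    st.1.Pairwise (fun a b => a.2.2.2 < b.2.2.2) →
    ((l.foldl pvDedupA st).1).Pairwise (fun a b => a.2.2.2 < b.2.2.2) := by
  intro l
  induction l with
  | nil => intro st _ _ h3; simpa using h3
  | cons ip l ih =>
    intro st h1 h2 h3
    rw [List.foldl_cons]
    rw [List.pairwise_cons] at h1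
    have hshape : (pvDedupA st ip).1 = st.1 ∨
        (pvDedupA st ip).1 = st.1 ++
          [(PySem.Str.strip ((PySem.Dict.mk ip.2).getD "pair_code" ""),
            PySem.Str.strip ((PySem.Dict.mk ip.2).getD "brand" ""),
            PySem.Str.strip ((PySem.Dict.mk ip.2).getD "category" ""), ip.1)] := by
      simp only [pvDedupA]
      split
      · exact Or.inl rfl
      · exact Or.inr rfl
    apply ih _ h1.2
    · intro m hm ip' hip'
      rcases hshape with hs | hs
      · exact h2 m (hs ▸ hm) ip' (List.mem_cons_of_mem _ hip')
      · rw [hs] at hm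
        rcases List.mem_append.mp hm with hm' | hm'
        · exact h2 m hm' ip' (List.mem_cons_of_mem _ hip')
        · rw [List.mem_singleton] at hm'
          rw [hm']
          exact h1.1 ip' hip'
    · rcases hshape with hs | hs
      · rw [hs]; exact h3
      · rw [hs]
        rw [List.pairwise_append]
        refine ⟨h3, List.pairwise_singleton _ _, ?_⟩
        intro a ha b hb
        rw [List.mem_singleton] at hb
        rw [hb]
        exact h2 a ha ip (List.mem_cons_self ..)

-- ----- B's sorted pool: insertion and the initial sort -----
theorem pvIns_perm (e : (Int × Int × Int) × String × String × String)
    (l : List ((Int × Int × Int) × String × String × String)) :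
    (pvIns e l).Perm (e :: l) := by
  induction l with
  | nil => simp [pvIns]
  | cons x xs ih =>
    simp only [pvIns]
    split
    · exact (ih.cons x).trans (List.Perm.swap e x xs)
    · exact List.Perm.refl _

theorem pvIns_ne_nil (e : (Int × Int × Int) × String × String × String)
    (l : List ((Int × Int × Int) × String × String × String)) :
    pvIns e l ≠ [] := by
  cases l with
  | nil => simp [pvIns]
  | cons x xs =>
    simp only [pvIns]
    split <;> simp

theorem pvIns_pairwise (e : (Int × Int × Int) × String × String × String)
    (l : List ((Int × Int × Int) × String × String × String))
    (hl : l.Pairwise (fun a b => pvTupLt3 a.1 b.1 = true))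
    (hne : ∀ y ∈ l, y.1.2.2 ≠ e.1.2.2) :
    (pvIns e l).Pairwise (fun a b => pvTupLt3 a.1 b.1 = true) := by
  induction l with
  | nil => simp [pvIns]
  | cons x xs ih =>
    rw [List.pairwise_cons] at hl
    simp only [pvIns]
    by_cases hxe : pvTupLt3 x.1 e.1 = true
    · rw [if_pos hxe]
      rw [List.pairwise_cons]
      constructor
      · intro y hy
        rcases List.mem_cons.mp ((pvIns_perm e xs).mem_iff.mp hy) with h | h
        · rw [h]; exact hxe
        · exact hl.1 y h
      · exact ih hl.2 (fun y hy => hne y (List.mem_cons_of_mem _ hy))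
    · rw [if_neg hxe]
      rw [Bool.not_eq_true] at hxe
      have hex : pvTupLt3 e.1 x.1 = true := by
        rcases pvLt_connex_of_ne_idx (a := x.1) (b := e.1) (hne x (List.mem_cons_self ..)) with h | h
        · rw [h] at hxe; cases hxe
        · exact h
      rw [List.pairwise_cons]
      constructor
      · intro y hy
        rcases List.mem_cons.mp hy with h | h
        · rw [h]; exact hex
        · exact pvLt_trans hex (hl.1 y h)
      · rw [List.pairwise_cons]; exact hl

theorem pv_foldl_insertBy_sorted :
    ∀ (l acc : List ((Int × Int × Int) × String × String × String)),
    (acc ++ l).Pairwise (fun a b => pvTupLt3 a.1 b.1 = true) →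
    l.foldl (fun acc x => PySem.List.insertBy (fun a b => pvTupLt3 a.1 b.1) x acc) acc = acc ++ l := by
  intro l
  induction l with
  | nil => intro acc _; simp
  | cons x xs ih =>
    intro acc hpw
    rw [List.foldl_cons]
    have hins : PySem.List.insertBy (fun a b => pvTupLt3 a.1 b.1) x acc = acc ++ [x] := by
      apply PySem.List.insertBy_of_forall_not_before
      intro y hy
      rw [List.pairwise_append] at hpw
      exact pvLt_asymm (hpw.2.2 y hy x (List.mem_cons_self ..))
    rw [hins]
    have := ih (acc ++ [x]) (by simpa using hpw)
    simpa using this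

-- ----- the lazy pop returns the unique current-key minimum and preserves the pool invariant -----
theorem pv_popFresh_spec (bc cc : PySem.Dict String Int) :
    ∀ (fuel : Nat) (pool : List ((Int × Int × Int) × String × String × String))
      (rem : List (String × String × String × Int)),
    (pool.map pvEntMeta).Perm rem →
    pool.Pairwise (fun a b => pvTupLt3 a.1 b.1 = true) →
    (∀ e ∈ pool, e.1.1 ≤ bc.getD e.2.2.1 0 ∧ e.1.2.1 ≤ cc.getD e.2.2.2 0) →
    ((pool.map (fun e => e.1.2.2)).Nodup) →
    pool.countP (fun e => !(decide (pvCurKey bc cc e = e.1))) < fuel →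
    pool ≠ [] →
    ∃ ce rest,
      pvPopFresh bc cc fuel pool = some (ce.2, rest) ∧
      pvEntMeta ce ∈ rem ∧
      (∀ m ∈ rem, m ≠ pvEntMeta ce →
        pvTupLt3 (pvKeyOf bc cc (pvEntMeta ce)) (pvKeyOf bc cc m) = true) ∧
      (rest.map pvEntMeta).Perm (rem.erase (pvEntMeta ce)) ∧
      rest.Pairwise (fun a b => pvTupLt3 a.1 b.1 = true) ∧
      (∀ e ∈ rest, e.1.1 ≤ bc.getD e.2.2.1 0 ∧ e.1.2.1 ≤ cc.getD e.2.2.2 0) ∧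
      ((rest.map (fun e => e.1.2.2)).Nodup) := by
  intro fuel
  induction fuel with
  | zero =>
    intro pool rem _ _ _ _ hcount _
    exact absurd hcount (by omega)
  | succ f ih =>
    intro pool rem hperm hpw hcomp hidx hcount hne
    cases pool with
    | nil => exact absurd rfl hne
    | cons e rest =>
      by_cases hfr : ((bc.getD e.2.2.1 0, cc.getD e.2.2.2 0, e.1.2.2) : Int × Int × Int) = e.1
      · -- fresh head: it is the unique minimum
        refine ⟨e, rest, ?_, ?_, ?_, ?_, ?_, ?_, ?_⟩
        · simp only [pvPopFresh]; rw [if_pos hfr]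
        · exact hperm.mem_iff.mp (by simp)
        · intro m hm hmne
          rcases List.mem_map.mp (hperm.symm.mem_iff.mp hm) with ⟨x, hx, hxm⟩
          have hxrest : x ∈ rest := by
            rcases List.mem_cons.mp hx with h | h
            · exact absurd (h ▸ hxm) (fun hh => hmne hh.symm)
            · exact h
          rw [List.pairwise_cons] at hpw
          have h1 : pvTupLt3 e.1 x.1 = true := hpw.1 x hxrest
          have h2 : pvTupLt3 (pvCurKey bc cc x) x.1 = false := by
            have hc := hcomp x (List.mem_cons_of_mem _ hxrest)
            exact pvLe_lex hc.1 hc.2 rfl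
          have h3 : pvTupLt3 e.1 (pvCurKey bc cc x) = true := pvLt_of_lt_of_not_lt h1 h2
          have hkey : pvKeyOf bc cc (pvEntMeta e) = e.1 := hfr
          have hkeyx : pvKeyOf bc cc m = pvCurKey bc cc x := by rw [← hxm]; rfl
          rw [hkey, hkeyx]
          exact h3
        · have h := hperm.erase (pvEntMeta e)
          simpa using h
        · exact (List.pairwise_cons.mp hpw).2
        · exact fun x hx => hcomp x (List.mem_cons_of_mem _ hx)
        · exact (List.nodup_cons.mp hidx).2
      · -- stale head: refresh its key, reinsert at the sorted position, recurse
        have hstep : pvPopFresh bc cc (f + 1) (e :: rest) =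
            pvPopFresh bc cc f (pvIns ((bc.getD e.2.2.1 0, cc.getD e.2.2.2 0, e.1.2.2), e.2) rest) := by
          simp only [pvPopFresh]; rw [if_neg hfr]
        set e' : (Int × Int × Int) × String × String × String :=
          ((bc.getD e.2.2.1 0, cc.getD e.2.2.2 0, e.1.2.2), e.2) with he'
        have hpermIns : (pvIns e' rest).Perm (e' :: rest) := pvIns_perm e' rest
        have hidx_cons := List.nodup_cons.mp hidx
        have hperm' : ((pvIns e' rest).map pvEntMeta).Perm rem :=
          (hpermIns.map pvEntMeta).trans hperm
        have hpw' : (pvIns e' rest).Pairwise (fun a b => pvTupLt3 a.1 b.1 = true) := by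
          apply pvIns_pairwise e' rest (List.pairwise_cons.mp hpw).2
          intro y hy hyy
          apply hidx_cons.1
          show e.1.2.2 ∈ List.map (fun e => e.1.2.2) rest
          have h5 : y.1.2.2 = e.1.2.2 := hyy
          rw [← h5]
          exact List.mem_map_of_mem hy
        have hcomp' : ∀ x ∈ pvIns e' rest,
            x.1.1 ≤ bc.getD x.2.2.1 0 ∧ x.1.2.1 ≤ cc.getD x.2.2.2 0 := by
          intro x hx
          rcases List.mem_cons.mp (hpermIns.mem_iff.mp hx) with h | h
          · rw [h]; exact ⟨le_refl _, le_refl _⟩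
          · exact hcomp x (List.mem_cons_of_mem _ h)
        have hidx' : ((pvIns e' rest).map (fun e => e.1.2.2)).Nodup := by
          have hp := hpermIns.map (fun e => e.1.2.2)
          rw [hp.nodup_iff]
          exact hidx
        have hcount' : (pvIns e' rest).countP (fun e => !(decide (pvCurKey bc cc e = e.1))) <
            f := by
          have hinsc : (pvIns e' rest).countP (fun e => !(decide (pvCurKey bc cc e = e.1))) =
              rest.countP (fun e => !(decide (pvCurKey bc cc e = e.1))) := by
            rw [hpermIns.countP_eq]
            simp [he', pvCurKey]
          have hpoolc : (e :: rest).countP (fun e => !(decide (pvCurKey bc cc e = e.1))) =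
              rest.countP (fun e => !(decide (pvCurKey bc cc e = e.1))) + 1 := by
            simp [pvCurKey, hfr]
          rw [hpoolc] at hcount
          rw [hinsc]
          omega
        obtain ⟨ce, rest', hpop, hm1, hm2, hm3, hm4, hm5, hm6⟩ :=
          ih (pvIns e' rest) rem hperm' hpw' hcomp' hidx' hcount' (pvIns_ne_nil e' rest)
        exact ⟨ce, rest', by rw [hstep]; exact hpop, hm1, hm2, hm3, hm4, hm5, hm6⟩

-- erasing an element whose code is unique is filtering that code out
theorem pv_erase_eq_filter :
    ∀ (rem : List (String × String × String × Int)) (m : String × String × String × Int),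
    ((rem.map (·.1)).Nodup) → m ∈ rem →
    rem.erase m = rem.filter (fun x => !(x.1 == m.1)) := by
  intro rem
  induction rem with
  | nil => intro m _ hm; cases hm
  | cons x t ih =>
    intro m hn hm
    rw [List.map_cons, List.nodup_cons] at hn
    by_cases hxm : x = m
    · subst hxm
      rw [List.erase_cons_head, List.filter_cons]
      have hh : (!(x.1 == x.1)) = false := by simp
      rw [hh]
      simp only [Bool.false_eq_true, if_false]
      symm
      rw [List.filter_eq_self]
      intro a ha
      have : a.1 ≠ x.1 := fun h => hn.1 (h ▸ List.mem_map_of_mem ha)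
      simp [this]
    · have hm' : m ∈ t := by
        rcases List.mem_cons.mp hm with h | h
        · exact absurd h.symm hxm
        · exact h
      rw [List.erase_cons_tail (by simp [hxm]), List.filter_cons]
      have hx1 : x.1 ≠ m.1 := fun h => hn.1 (h ▸ List.mem_map_of_mem hm')
      have hh : (!(x.1 == m.1)) = true := by simp [hx1]
      rw [hh, if_pos rfl, ih m hn.2 hm']

-- counts only grow
theorem pv_getD_insert_ge (d : PySem.Dict String Int) (k x : String) :
    d.getD x 0 ≤ (d.insert k (d.getD k 0 + 1)).getD x 0 := by
  rw [PySem.Dict.getD_insert]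
  split
  · rename_i h; rw [h]; omega
  · exact le_refl _

theorem pv_getD_empty (k : String) :
    (PySem.Dict.empty : PySem.Dict String Int).getD k 0 = 0 := rfl

-- ----- the two greedy loops agree when B's pool stands for A's unselected candidates -----
theorem pv_loop_eq (pm : List (String × String × String × Int))
    (hcodes : (pm.map (·.1)).Nodup) :
    ∀ (n : Nat) (sel : List String) (sset : PySem.Set String)
      (bc cc : PySem.Dict String Int)
      (pool : List ((Int × Int × Int) × String × String × String)),
    (pool.map pvEntMeta).Perm (pm.filter (fun m => !(PySem.Set.contains sset m.1))) →
    pool.Pairwise (fun a b => pvTupLt3 a.1 b.1 = true) →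
    (∀ e ∈ pool, e.1.1 ≤ bc.getD e.2.2.1 0 ∧ e.1.2.1 ≤ cc.getD e.2.2.2 0) →
    ((pool.map (fun e => e.1.2.2)).Nodup) →
    pvLoopB n pool bc cc sel = pvLoopA pm n sel sset bc cc := by
  intro n
  induction n with
  | zero => intro sel sset bc cc pool _ _ _ _; rfl
  | succ n ih =>
    intro sel sset bc cc pool hperm hpw hcomp hidx
    cases hR : pm.filter (fun m => !(PySem.Set.contains sset m.1)) with
    | nil =>
      have hpool : pool = [] := by
        rw [hR] at hperm
        exact List.map_eq_nil_iff.mp hperm.eq_nil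
      subst hpool
      simp only [pvLoopB, pvLoopA, hR]
      rfl
    | cons c cs =>
      rw [hR] at hperm
      have hne : pool ≠ [] := by
        intro h; subst h
        exact absurd hperm.symm.eq_nil (by simp)
      obtain ⟨ce, rest, hpop, hmem, hstrict, hpermrest, hpw', hcomp', hidx'⟩ :=
        pv_popFresh_spec bc cc (pool.length + 1) pool (c :: cs) hperm hpw hcomp hidx
          (by have := List.countP_le_length
                (p := (fun e => !(decide (pvCurKey bc cc e = e.1)))) (l := pool)
              omega) hne
      have hbest : cs.foldl (pvMinStep bc cc) c = pvEntMeta ce :=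
        pv_foldl_min_unique bc cc cs c (pvEntMeta ce) hmem hstrict
      have hB : pvLoopB (n + 1) pool bc cc sel =
          pvLoopB n rest (bc.insert ce.2.2.1 (bc.getD ce.2.2.1 0 + 1))
            (cc.insert ce.2.2.2 (cc.getD ce.2.2.2 0 + 1)) (sel ++ [ce.2.1]) := by
        simp only [pvLoopB]
        rw [hpop]
      have hA : pvLoopA pm (n + 1) sel sset bc cc =
          pvLoopA pm n (sel ++ [ce.2.1]) (PySem.Set.add sset ce.2.1)
            (bc.insert ce.2.2.1 (bc.getD ce.2.2.1 0 + 1))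
            (cc.insert ce.2.2.2 (cc.getD ce.2.2.2 0 + 1)) := by
        simp only [pvLoopA]
        rw [hR]
        simp only [hbest]
        rfl
      rw [hB, hA]
      have hnotin : PySem.Set.contains sset ce.2.1 = false := by
        have h := List.of_mem_filter (hR ▸ hmem)
        simpa using h
      have hcodesR : ((c :: cs).map (·.1)).Nodup := by
        rw [← hR]
        exact hcodes.sublist (List.filter_sublist.map _)
      have hfilt : pm.filter (fun m => !(PySem.Set.contains (PySem.Set.add sset ce.2.1) m.1)) =
          (c :: cs).erase (pvEntMeta ce) := by
        rw [pv_erase_eq_filter (c :: cs) (pvEntMeta ce) hcodesR hmem]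
        rw [← hR, List.filter_filter]
        apply List.filter_congr
        intro a _
        have hnotin' : ce.2.1 ∉ sset := by
          simpa [PySem.Set.contains] using hnotin
        rw [Bool.eq_iff_iff]
        simp only [pvEntMeta]
        simp [PySem.Set.add, PySem.Set.contains, hnotin']
        tauto
      apply ih
      · rw [hfilt]; exact hpermrest
      · exact hpw'
      · intro x hx
        refine ⟨le_trans (hcomp' x hx).1 ?_, le_trans (hcomp' x hx).2 ?_⟩
        · exact pv_getD_insert_ge bc ce.2.2.1 x.2.2.1
        · exact pv_getD_insert_ge cc ce.2.2.2 x.2.2.2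
      · exact hidx'

-- ===== VERDICT (by name: the statement is the Claim_ definition above) =====
theorem select_diverse_pair_codes_spec : Claim_equal_select_diverse_pair_codes := by
  intro products limit _
  unfold Spec_select_diverse_pair_codes
  simp only [select_diverse_pair_codes, select_diverse_pair_codes_alt]
  by_cases h0 : limit ≤ 0
  · simp [h0]
  · rw [if_neg h0, if_neg h0]
    have h1 : (PySem.List.enumerate products).foldl pvDedupB PySem.Dict.empty =
        PySem.Dict.mk ((((PySem.List.enumerate products).foldl pvDedupA ([], PySem.Set.empty)).1).map
          (fun m => (m.1, m.2))) :=
      (pv_dedup_inv (PySem.List.enumerate products) [] (by simp)).1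
    have h3 : ((((PySem.List.enumerate products).foldl pvDedupA ([], PySem.Set.empty)).1).map (·.1)).Nodup :=
      (pv_dedup_inv (PySem.List.enumerate products) [] (by simp)).2.2
    have hidxpm : (((PySem.List.enumerate products).foldl pvDedupA ([], PySem.Set.empty)).1).Pairwise
        (fun a b => a.2.2.2 < b.2.2.2) := by
      apply pv_dedupA_idx
      · have hpr := PySem.List.pairwise_lt_pyRange_one (a := 0) (b := (0 : Int) + products.length)
        rw [← PySem.List.map_fst_enumerate] at hpr
        exact List.pairwise_map.mp hpr
      · intro m hm; cases hm
      · exact List.Pairwise.nil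
    set stA := (PySem.List.enumerate products).foldl pvDedupA ([], PySem.Set.empty) with hstA
    rw [h1]
    rw [List.length_map]
    by_cases h2 : ((stA.1.length : Int) ≤ limit)
    · rw [if_pos h2, if_pos h2]
      congr 1
      rw [PySem.Dict.keys_mk, List.map_map]
      exact List.map_congr_left (fun a _ => rfl)
    · rw [if_neg h2, if_neg h2]
      congr 1
      rw [List.map_map]
      have hpool0 : stA.1.map ((fun kv : String × String × String × Int =>
            ((((0:Int), (0:Int), kv.2.2.2) : Int × Int × Int), kv.1, kv.2.1, kv.2.2.1)) ∘
            (fun m : String × String × String × Int => (m.1, m.2))) =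
          stA.1.map (fun m => ((((0:Int), (0:Int), m.2.2.2) : Int × Int × Int), m.1, m.2.1, m.2.2.1)) :=
        List.map_congr_left (fun a _ => rfl)
      rw [hpool0]
      set pool0 := stA.1.map (fun m => ((((0:Int), (0:Int), m.2.2.2) : Int × Int × Int), m.1, m.2.1, m.2.2.1)) with hpool0def
      have hpool0pw : pool0.Pairwise (fun a b => pvTupLt3 a.1 b.1 = true) := by
        rw [hpool0def, List.pairwise_map]
        exact hidxpm.imp (fun h => pvLt_00 h)
      have hsorted : pool0.foldl
          (fun acc x => PySem.List.insertBy (fun a b => pvTupLt3 a.1 b.1) x acc) [] = pool0 := by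
        have h := pv_foldl_insertBy_sorted pool0 [] (by simpa using hpool0pw)
        simpa using h
      rw [hsorted]
      symm
      apply pv_loop_eq stA.1 h3 limit.toNat [] PySem.Set.empty PySem.Dict.empty PySem.Dict.empty pool0
      · have hmeta : pool0.map pvEntMeta = stA.1 := by
          rw [hpool0def, List.map_map]
          exact (List.map_congr_left (fun a _ => rfl)).trans (List.map_id _)
        rw [hmeta]
        have hfilter : stA.1.filter (fun m => !(PySem.Set.contains PySem.Set.empty m.1)) = stA.1 := by
          rw [List.filter_eq_self]
          intro a _
          rfl
        rw [hfilter]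
      · exact hpool0pw
      · intro e he
        rw [hpool0def] at he
        rcases List.mem_map.mp he with ⟨m, _, hme⟩
        rw [← hme]
        exact ⟨le_of_eq (pv_getD_empty _).symm, le_of_eq (pv_getD_empty _).symm⟩
      · rw [hpool0def, List.map_map]
        show (stA.1.map _).Pairwise (· ≠ ·)
        rw [List.pairwise_map]
        exact hidxpm.imp (fun h => ne_of_lt h)
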